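-- pv_equiv track=rewrite | github.com/381706-2BandenkovD/bioInf | Implement GreedyMotifSearch with pseudocounts.py | count
-- ===== SOURCE A (Python) =====
-- def symToNum(sym):
-- 	if sym == "A":
-- 		return 0
-- 	if sym == "C":
-- 		return 1
-- 	if sym == "G":
-- 		return 2
-- 	if sym == "T":
-- 		return 3
--
-- def numToSym(tmp):
-- 	if tmp == 0:
-- 		return "A"
-- 	if tmp == 1:
-- 		return "C"
-- 	if tmp == 2:
-- 		return "G"
-- 	if tmp == 3:
-- 		return "T"
--
-- def matrixProfileF(motifs):
-- 	k = len(motifs[0])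
-- 	matrix = [[1 for i in range(k)] for j in range(4)]
-- 	for x in motifs:
-- 		for i in range(len(x)):
-- 			j = symToNum(x[i])
-- 			matrix[j][i] += 1
-- 	for x in matrix:
-- 		for y in x:
-- 			y = y/len(motifs)
-- 	return matrix
--
-- def agreee(profile):
-- 	str = ""
-- 	for i in range(len(profile[0])):
-- 		max = 0
-- 		loc = 0
-- 		for j in range(4):
-- 			if profile[j][i] > max:
-- 				loc = j
-- 				max = profile[j][i]
-- 		str+=numToSym(loc)
-- 	return str
--
-- def count(motifs):
-- 	profile = matrixProfileF(motifs)
-- 	agr = agreee(profile)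
-- 	score = 0
-- 	for x in motifs:
-- 		for i in range(len(x)):
-- 			if agr[i] != x[i]:
-- 				score += 1
-- 	return score
-- ===== SOURCE B (Python) =====
-- def count(motifs):
-- 	k = len(motifs[0])
-- 	idx = {"A": 0, "C": 1, "G": 2, "T": 3}
-- 	counts = [[0, 0, 0, 0] for _ in range(k)]
-- 	for x in motifs:
-- 		for i in range(len(x)):
-- 			counts[i][idx[x[i]]] += 1
-- 	return sum(sum(col) - max(col) for col in counts)
-- ===== Notes on version B (the rewrite author's own statement) =====
-- stated objective: simpler
-- what changed: B scores motifs directly as the sum over columns of (column count - max symbol count) from one row-major counting pass, never building the 4xk pseudocount profile, the consensus string, or the second mismatch-scan over all motifs (the uniform +1 pseudocount cancels).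
import Mathlib
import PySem

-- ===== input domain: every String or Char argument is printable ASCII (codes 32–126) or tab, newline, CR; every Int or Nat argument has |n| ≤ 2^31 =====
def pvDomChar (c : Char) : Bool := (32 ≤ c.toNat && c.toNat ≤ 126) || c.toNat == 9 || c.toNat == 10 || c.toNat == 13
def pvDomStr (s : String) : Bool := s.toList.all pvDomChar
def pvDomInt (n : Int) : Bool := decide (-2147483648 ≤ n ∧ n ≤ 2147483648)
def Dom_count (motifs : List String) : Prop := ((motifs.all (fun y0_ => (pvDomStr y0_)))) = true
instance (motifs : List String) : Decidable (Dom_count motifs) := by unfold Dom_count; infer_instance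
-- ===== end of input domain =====

-- B scores motifs directly as sum over columns of (count - max symbol count) in one counting
-- pass, dropping A's pseudocount profile, consensus string and second mismatch scan (simpler).


-- ===== PORT A =====
def symToNum (sym : Char) : Option Int :=
  if sym = 'A' then some 0
  else if sym = 'C' then some 1
  else if sym = 'G' then some 2
  else if sym = 'T' then some 3
  else none  -- Python falls off the end: returns None

def numToSym (tmp : Int) : Option String :=
  if tmp = 0 then some "A"
  else if tmp = 1 then some "C"
  else if tmp = 2 then some "G"
  else if tmp = 3 then some "T"
  else none

-- matrix[j][i] += 1; a None j (Python TypeError) or an i beyond the row (IndexError) is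
-- excluded by Pre_count, so those branches are modeled as no-ops (List.modify is id there).
-- The final 'for x in matrix: for y in x: y = y/len(motifs)' loop of A rebinds a local
-- name and changes nothing; it is a no-op and is omitted.
def matrixProfileF (motifs : List String) : List (List Int) :=
  let k := ((PySem.List.pyGet? motifs 0).getD "").toList.length
  let matrix : List (List Int) := List.replicate 4 (List.replicate k 1)
  motifs.foldl (fun m x =>
    (List.range x.toList.length).foldl (fun m i =>
      match symToNum (x.toList.getD i ' ') with
      | some j => m.modify j.toNat (fun row => row.modify i (· + 1))
      | none => m) m) matrix

def agreee (profile : List (List Int)) : String :=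
  (List.range (profile.getD 0 []).length).foldl (fun s i =>
    let p := (List.range 4).foldl (fun (p : Int × Int) j =>
      if (profile.getD j []).getD i 0 > p.1 then ((profile.getD j []).getD i 0, (j : Int))
      else p) ((0 : Int), (0 : Int))
    s ++ (numToSym p.2).getD "") ""   -- p.2 is always 0..3, so numToSym never misses

def count (motifs : List String) : Int :=
  let profile := matrixProfileF motifs
  let agr := agreee profile
  -- agr[i] with i ≥ len(agr) would be an IndexError; excluded by Pre_count (len(x) ≤ k)
  motifs.foldl (fun score x =>
    (List.range x.toList.length).foldl (fun sc i =>
      if agr.toList.getD i ' ' ≠ x.toList.getD i ' ' then sc + 1 else sc) score) 0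

-- ===== PORT B =====
-- idx = {"A": 0, "C": 1, "G": 2, "T": 3}; idx[c] — none is Python's KeyError (outside Pre_count)
def idxGet (c : Char) : Option Int :=
  if c = 'A' then some 0
  else if c = 'C' then some 1
  else if c = 'G' then some 2
  else if c = 'T' then some 3
  else none

def count_alt (motifs : List String) : Int :=
  let k := ((PySem.List.pyGet? motifs 0).getD "").toList.length
  let counts0 : List (List Int) := (List.range k).map (fun _ => [0, 0, 0, 0])
  let counts := motifs.foldl (fun cs x =>
    (List.range x.toList.length).foldl (fun cs i =>
      match idxGet (x.toList.getD i ' ') with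
      | some s => cs.modify i (fun col => col.modify s.toNat (· + 1))
      | none => cs) cs) counts0
  counts.foldl (fun acc col => acc + (col.sum - (PySem.List.max? col (fun y => y)).getD 0)) 0

-- ===== PRECONDITION & SPEC =====
-- Pre_count admits exactly the inputs A returns on: nonempty motifs (else motifs[0] is an
-- IndexError), every character in ACGT (else symToNum yields None and matrix[None][i] is a
-- TypeError), and no motif longer than motifs[0] (else matrix[j][i] / agr[i] is an IndexError).
def Pre_count (motifs : List String) : Prop :=
  motifs ≠ [] ∧
  (motifs.all (fun x => decide (x.toList.length ≤ (motifs.headD "").toList.length) &&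
    x.toList.all (fun c => c = 'A' || c = 'C' || c = 'G' || c = 'T'))) = true
instance (motifs : List String) : Decidable (Pre_count motifs) := by
  unfold Pre_count; infer_instance

def pvWitness_count : List String := ["ACG", "TA", "GGG"]

def Spec_count (motifs : List String) (out : Int) : Prop := out = count_alt motifs
instance (motifs : List String) (out : Int) : Decidable (Spec_count motifs out) := by
  unfold Spec_count; infer_instance

-- ===== CLAIM (what is proved, stated in full; the proofs are below) =====
def Claim_equal_count : Prop :=
  ∀ (motifs : List String), Dom_count motifs → Pre_count motifs →
    Spec_count motifs (count motifs)

-- ===== LEMMAS AND PROOFS =====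

-- Pre_count unpacked into its propositional form
theorem pre_unfold (motifs : List String) (h : Pre_count motifs) :
    motifs ≠ [] ∧ ∀ x ∈ motifs,
      x.toList.length ≤ (motifs.headD "").toList.length ∧
      ∀ c ∈ x.toList, c = 'A' ∨ c = 'C' ∨ c = 'G' ∨ c = 'T' := by
  obtain ⟨h1, h2⟩ := h
  refine ⟨h1, fun x hx => ?_⟩
  rw [List.all_eq_true] at h2
  have := h2 x hx
  simp only [Bool.and_eq_true, decide_eq_true_eq, List.all_eq_true] at this
  refine ⟨this.1, fun c hc => ?_⟩
  have h3 := this.2 c hc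
  simp only [Bool.or_eq_true, decide_eq_true_eq] at h3
  tauto
theorem getD_modify {α : Type} (l : List α) (i j : Nat) (f : α → α) (d : α) :
    (l.modify i f).getD j d = if j = i ∧ i < l.length then f (l.getD j d) else l.getD j d := by
  simp only [List.getD_eq_getElem?_getD, List.getElem?_modify]
  by_cases hj : j < l.length
  · rw [List.getElem?_eq_getElem hj]
    by_cases h : i = j <;> simp [h] <;> omega
  · rw [List.getElem?_eq_none (by omega)]
    simp; omega

def Shape (r c : Nat) (m : List (List Int)) : Prop :=
  m.length = r ∧ ∀ j, ((m.getD j []).length = if j < r then c else 0)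

theorem get_bump (r c : Nat) (m : List (List Int)) (hm : Shape r c m)
    (jn i : Nat) (hj : jn < r) (hi : i < c) (j' i' : Nat) :
    (((m.modify jn (fun row => row.modify i (· + 1))).getD j' []).getD i' 0)
      = ((m.getD j' []).getD i' 0) + (if j' = jn ∧ i' = i then 1 else 0) := by
  obtain ⟨hlen, hrow⟩ := hm
  have hrl : (m.getD jn []).length = c := by rw [hrow jn, if_pos hj]
  rw [getD_modify]
  by_cases h : j' = jn
  · subst h
    rw [if_pos ⟨rfl, by omega⟩, getD_modify, hrl]
    by_cases h2 : i' = i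
    · subst h2
      rw [if_pos ⟨rfl, hi⟩, if_pos ⟨rfl, rfl⟩]
    · rw [if_neg (fun hc => h2 hc.1), if_neg (fun hc => h2 hc.2)]
      simp
  · rw [if_neg (fun hc => h hc.1), if_neg (fun hc => h hc.1)]
    simp

theorem shape_bump (r c : Nat) (m : List (List Int)) (hm : Shape r c m) (jn i : Nat) :
    Shape r c (m.modify jn (fun row => row.modify i (· + 1))) := by
  obtain ⟨hlen, hrow⟩ := hm
  refine ⟨by simp [hlen], fun j => ?_⟩
  rw [getD_modify]
  by_cases h : j = jn ∧ jn < m.length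
  · rw [if_pos h, List.length_modify, hrow j]
  · rw [if_neg h, hrow j]

theorem inner_fold (r c : Nat) (jf cf : Nat → Nat) (n : Nat)
    (hb : ∀ t < n, jf t < r ∧ cf t < c) :
    ∀ (m : List (List Int)), Shape r c m →
      Shape r c ((List.range n).foldl
        (fun m t => m.modify (jf t) (fun row => row.modify (cf t) (· + 1))) m) ∧
      ∀ j' i', ((((List.range n).foldl
          (fun m t => m.modify (jf t) (fun row => row.modify (cf t) (· + 1))) m).getD j' []).getD i' 0)
        = ((m.getD j' []).getD i' 0)
          + ((List.range n).map (fun t => if jf t = j' ∧ cf t = i' then (1 : Int) else 0)).sum := by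
  induction n with
  | zero => simp
  | succ n ih =>
    intro m hm
    have hb' : ∀ t < n, jf t < r ∧ cf t < c := fun t ht => hb t (by omega)
    obtain ⟨hsh, hget⟩ := ih hb' m hm
    rw [List.range_succ]
    simp only [List.foldl_append, List.foldl_cons, List.foldl_nil, List.map_append,
      List.map_cons, List.map_nil, List.sum_append, List.sum_cons, List.sum_nil]
    obtain ⟨hjn, hcn⟩ := hb n (by omega)
    refine ⟨shape_bump r c _ hsh _ _, fun j' i' => ?_⟩
    rw [get_bump r c _ hsh _ _ hjn hcn, hget]
    have : (jf n = j' ∧ cf n = i') ↔ (j' = jf n ∧ i' = cf n) := by constructor <;> (intro ⟨a,b⟩; exact ⟨a.symm, b.symm⟩)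
    simp [this]; split_ifs <;> ring


def cnt (motifs : List String) (i : Nat) (j : Nat) : Int :=
  (motifs.map (fun x =>
    if i < x.toList.length ∧ symToNum (x.toList.getD i ' ') = some (j : Int)
    then (1 : Int) else 0)).sum

def ACGT (c : Char) : Prop := c = 'A' ∨ c = 'C' ∨ c = 'G' ∨ c = 'T'

-- picking sums
theorem pick_sum_left (n : Nat) (P : Nat → Prop) [DecidablePred P] (i : Nat) :
    ((List.range n).map (fun t => if P t ∧ t = i then (1 : Int) else 0)).sum
      = if i < n ∧ P i then 1 else 0 := by
  induction n with
  | zero => simp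
  | succ n ih =>
    rw [List.range_succ]
    simp only [List.map_append, List.sum_append, List.map_cons, List.map_nil,
      List.sum_cons, List.sum_nil, ih]
    by_cases h : i = n
    · subst h; by_cases hp : P i <;> simp [hp] <;> omega
    · by_cases hp : P i <;> simp [hp, Ne.symm h] <;> omega

theorem pick_sum_right (n : Nat) (P : Nat → Prop) [DecidablePred P] (i : Nat) :
    ((List.range n).map (fun t => if t = i ∧ P t then (1 : Int) else 0)).sum
      = if i < n ∧ P i then 1 else 0 := by
  rw [← pick_sum_left n P i]
  congr 1; apply List.map_congr_left; intro t _
  simp [and_comm]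

-- symbol map on ACGT characters
theorem symToNum_of_ACGT (c : Char) (h : ACGT c) :
    ∃ jv : Nat, jv < 4 ∧ symToNum c = some (jv : Int) := by
  rcases h with h | h | h | h <;> subst h
  · exact ⟨0, by norm_num, rfl⟩
  · exact ⟨1, by norm_num, rfl⟩
  · exact ⟨2, by norm_num, rfl⟩
  · exact ⟨3, by norm_num, rfl⟩

def jfx (x : List Char) (t : Nat) : Nat := ((symToNum (x.getD t ' ')).getD 0).toNat

theorem jfx_lt (x : List Char) (t : Nat) (ht : t < x.length) (hc : ∀ c ∈ x, ACGT c) :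
    jfx x t < 4 := by
  obtain ⟨jv, hjv, hs⟩ := symToNum_of_ACGT (x.getD t ' ')
    (by rw [List.getD_eq_getElem x ' ' ht]; exact List.getElem_mem ht |> hc _)
  simp only [jfx]; rw [hs]; simp; omega

theorem jfx_iff (x : List Char) (i j : Nat) (hi : i < x.length) (hc : ∀ c ∈ x, ACGT c) :
    jfx x i = j ↔ symToNum (x.getD i ' ') = some (j : Int) := by
  obtain ⟨jv, hjv, hs⟩ := symToNum_of_ACGT (x.getD i ' ')
    (by rw [List.getD_eq_getElem x ' ' hi]; exact List.getElem_mem hi |> hc _)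
  simp only [jfx]; rw [hs]
  simp only [Option.getD_some, Option.some_inj]
  constructor
  · intro h; omega
  · intro h; omega

theorem innerA (k : Nat) (x : List Char) (hk : x.length ≤ k) (hc : ∀ c ∈ x, ACGT c)
    (m : List (List Int)) (hm : Shape 4 k m) :
    Shape 4 k ((List.range x.length).foldl (fun m i =>
        match symToNum (x.getD i ' ') with
        | some j => m.modify j.toNat (fun row => row.modify i (· + 1))
        | none => m) m) ∧
    ∀ j i, (((List.range x.length).foldl (fun m i =>
        match symToNum (x.getD i ' ') with
        | some j => m.modify j.toNat (fun row => row.modify i (· + 1))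
        | none => m) m).getD j []).getD i 0
      = ((m.getD j []).getD i 0)
        + (if i < x.length ∧ symToNum (x.getD i ' ') = some (j : Int) then 1 else 0) := by
  have hrw : ∀ (m0 : List (List Int)), (List.range x.length).foldl (fun m i =>
        match symToNum (x.getD i ' ') with
        | some j => m.modify j.toNat (fun row => row.modify i (· + 1))
        | none => m) m0
      = (List.range x.length).foldl
        (fun m t => m.modify (jfx x t) (fun row => row.modify t (· + 1))) m0 := by
    intro m0
    apply PySem.List.foldl_congr_mem
    intro acc t ht
    rw [List.mem_range] at ht
    obtain ⟨jv, hjv, hs⟩ := symToNum_of_ACGT (x.getD t ' ')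
      (by rw [List.getD_eq_getElem x ' ' ht]; exact List.getElem_mem ht |> hc _)
    simp only [jfx]
    rw [hs]
    simp only [Option.getD_some]
  rw [hrw]
  have hb : ∀ t < x.length, jfx x t < 4 ∧ t < k :=
    fun t ht => ⟨jfx_lt x t ht hc, by omega⟩
  obtain ⟨hsh, hget⟩ := inner_fold 4 k (jfx x) (fun t => t) x.length hb m hm
  refine ⟨hsh, fun j i => ?_⟩
  rw [hget j i, pick_sum_left x.length (fun t => jfx x t = j) i]
  congr 1
  by_cases hi : i < x.length
  · simp only [jfx_iff x i j hi hc]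
  · simp [hi]

theorem matA_chr (k : Nat) : ∀ (motifs : List String) (m : List (List Int)), Shape 4 k m →
    (∀ x ∈ motifs, x.toList.length ≤ k ∧ ∀ c ∈ x.toList, ACGT c) →
    Shape 4 k (motifs.foldl (fun m x =>
      (List.range x.toList.length).foldl (fun m i =>
        match symToNum (x.toList.getD i ' ') with
        | some j => m.modify j.toNat (fun row => row.modify i (· + 1))
        | none => m) m) m) ∧
    ∀ j i, ((motifs.foldl (fun m x =>
      (List.range x.toList.length).foldl (fun m i =>
        match symToNum (x.toList.getD i ' ') with
        | some j => m.modify j.toNat (fun row => row.modify i (· + 1))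
        | none => m) m) m).getD j []).getD i 0
      = ((m.getD j []).getD i 0) + cnt motifs i j := by
  intro motifs
  induction motifs with
  | nil => intro m hm _; exact ⟨hm, by simp [cnt]⟩
  | cons x xs ih =>
    intro m hm hok
    obtain ⟨hk, hc⟩ := hok x (by simp)
    obtain ⟨hsh1, hget1⟩ := innerA k x.toList hk hc m hm
    obtain ⟨hsh2, hget2⟩ := ih _ hsh1 (fun y hy => hok y (by simp [hy]))
    simp only [List.foldl_cons]
    refine ⟨hsh2, fun j i => ?_⟩
    rw [hget2 j i, hget1 j i]
    simp [cnt]; ring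


theorem idxGet_eq_symToNum (c : Char) : idxGet c = symToNum c := rfl

theorem innerB (k : Nat) (x : List Char) (hk : x.length ≤ k) (hc : ∀ c ∈ x, ACGT c)
    (m : List (List Int)) (hm : Shape k 4 m) :
    Shape k 4 ((List.range x.length).foldl (fun cs i =>
        match idxGet (x.getD i ' ') with
        | some s => cs.modify i (fun col => col.modify s.toNat (· + 1))
        | none => cs) m) ∧
    ∀ i s, (((List.range x.length).foldl (fun cs i =>
        match idxGet (x.getD i ' ') with
        | some s => cs.modify i (fun col => col.modify s.toNat (· + 1))
        | none => cs) m).getD i []).getD s 0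
      = ((m.getD i []).getD s 0)
        + (if i < x.length ∧ symToNum (x.getD i ' ') = some (s : Int) then 1 else 0) := by
  have hrw : (List.range x.length).foldl (fun cs i =>
        match idxGet (x.getD i ' ') with
        | some s => cs.modify i (fun col => col.modify s.toNat (· + 1))
        | none => cs) m
      = (List.range x.length).foldl
        (fun cs t => cs.modify t (fun col => col.modify (jfx x t) (· + 1))) m := by
    apply PySem.List.foldl_congr_mem
    intro acc t ht
    rw [List.mem_range] at ht
    obtain ⟨jv, hjv, hs⟩ := symToNum_of_ACGT (x.getD t ' ')
      (by rw [List.getD_eq_getElem x ' ' ht]; exact List.getElem_mem ht |> hc _)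
    rw [idxGet_eq_symToNum, hs]
    simp only [jfx]
    rw [hs]
    simp only [Option.getD_some]
  rw [hrw]
  have hb : ∀ t < x.length, t < k ∧ jfx x t < 4 :=
    fun t ht => ⟨by omega, jfx_lt x t ht hc⟩
  obtain ⟨hsh, hget⟩ := inner_fold k 4 (fun t => t) (jfx x) x.length hb m hm
  refine ⟨hsh, fun i s => ?_⟩
  rw [hget i s, pick_sum_right x.length (fun t => jfx x t = s) i]
  congr 1
  by_cases hi : i < x.length
  · simp only [jfx_iff x i s hi hc]
  · simp [hi]

theorem cntB_chr (k : Nat) : ∀ (motifs : List String) (m : List (List Int)), Shape k 4 m →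
    (∀ x ∈ motifs, x.toList.length ≤ k ∧ ∀ c ∈ x.toList, ACGT c) →
    Shape k 4 (motifs.foldl (fun cs x =>
      (List.range x.toList.length).foldl (fun cs i =>
        match idxGet (x.toList.getD i ' ') with
        | some s => cs.modify i (fun col => col.modify s.toNat (· + 1))
        | none => cs) cs) m) ∧
    ∀ i s, ((motifs.foldl (fun cs x =>
      (List.range x.toList.length).foldl (fun cs i =>
        match idxGet (x.toList.getD i ' ') with
        | some s => cs.modify i (fun col => col.modify s.toNat (· + 1))
        | none => cs) cs) m).getD i []).getD s 0
      = ((m.getD i []).getD s 0) + cnt motifs i s := by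
  intro motifs
  induction motifs with
  | nil => intro m hm _; exact ⟨hm, by simp [cnt]⟩
  | cons x xs ih =>
    intro m hm hok
    obtain ⟨hk, hc⟩ := hok x (by simp)
    obtain ⟨hsh1, hget1⟩ := innerB k x.toList hk hc m hm
    obtain ⟨hsh2, hget2⟩ := ih _ hsh1 (fun y hy => hok y (by simp [hy]))
    simp only [List.foldl_cons]
    refine ⟨hsh2, fun i s => ?_⟩
    rw [hget2 i s, hget1 i s]
    simp [cnt]; ring
theorem best_spec (v : Nat → Int) (h0 : 0 < v 0) :
    ∀ n, 1 ≤ n → ∃ ln : Nat, ln < n ∧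
      ((List.range n).foldl (fun (p : Int × Int) j => if v j > p.1 then (v j, (j : Int)) else p) (0, 0)).2 = (ln : Int) ∧
      ((List.range n).foldl (fun (p : Int × Int) j => if v j > p.1 then (v j, (j : Int)) else p) (0, 0)).1 = v ln ∧
      (∀ j < n, v j ≤ ((List.range n).foldl (fun (p : Int × Int) j => if v j > p.1 then (v j, (j : Int)) else p) (0, 0)).1) := by
  intro n
  induction n with
  | zero => omega
  | succ n ih =>
    intro _
    by_cases hn : 1 ≤ n
    · obtain ⟨ln, hln, h2, h1, hub⟩ := ih hn
      rw [List.range_succ, List.foldl_append, List.foldl_cons, List.foldl_nil]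
      by_cases hgt : v n > ((List.range n).foldl (fun (p : Int × Int) j => if v j > p.1 then (v j, (j : Int)) else p) (0, 0)).1
      · rw [if_pos hgt]
        exact ⟨n, by omega, rfl, rfl, fun j hj => by
          rcases Nat.lt_succ_iff_lt_or_eq.mp hj with h | h
          · exact le_of_lt (lt_of_le_of_lt (hub j h) hgt)
          · subst h; rfl⟩
      · rw [if_neg hgt]
        exact ⟨ln, by omega, h2, h1, fun j hj => by
          rcases Nat.lt_succ_iff_lt_or_eq.mp hj with h | h
          · exact hub j h
          · subst h; omega⟩
    · have hn0 : n = 0 := by omega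
      subst hn0
      simp only [show List.range 1 = [0] from by decide, List.foldl_cons, List.foldl_nil]
      rw [if_pos (by simpa using h0)]
      exact ⟨0, by omega, rfl, rfl, fun j hj => by interval_cases j; simp⟩



-- ===== string-building loop of agreee =====
theorem foldl_strcat_toList (g : Nat → String) (l : List Nat) :
    ∀ s : String, (l.foldl (fun s i => s ++ g i) s).toList
      = s.toList ++ l.flatMap (fun i => (g i).toList) := by
  induction l with
  | nil => simp
  | cons a l ih => intro s; simp [ih, String.toList_append]

-- location and character the agreee loop picks for column i
def locAt (profile : List (List Int)) (i : Nat) : Int :=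
  ((List.range 4).foldl (fun (p : Int × Int) j =>
    if (profile.getD j []).getD i 0 > p.1 then ((profile.getD j []).getD i 0, (j : Int))
    else p) ((0 : Int), (0 : Int))).2

def symChar (ln : Nat) : Char :=
  if ln = 0 then 'A' else if ln = 1 then 'C' else if ln = 2 then 'G' else 'T'

theorem symChar_ACGT (ln : Nat) : ACGT (symChar ln) := by
  unfold symChar ACGT; split_ifs <;> simp

theorem symToNum_symChar (ln : Nat) (h : ln < 4) : symToNum (symChar ln) = some (ln : Int) := by
  interval_cases ln <;> rfl

theorem numToSym_loc (ln : Nat) (h : ln < 4) :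
    ((numToSym ((ln : Nat) : Int)).getD "").toList = [symChar ln] := by
  interval_cases ln <;> rfl

theorem agreee_toList (profile : List (List Int))
    (h : ∀ i < (profile.getD 0 []).length, ∃ ln : Nat, ln < 4 ∧ locAt profile i = (ln : Int)) :
    (agreee profile).toList
      = (List.range (profile.getD 0 []).length).map
          (fun i => (((numToSym (locAt profile i)).getD "").toList).getD 0 ' ') := by
  have e : (agreee profile).toList
      = "".toList ++ (List.range (profile.getD 0 []).length).flatMap
          (fun i => ((numToSym (locAt profile i)).getD "").toList) :=
    foldl_strcat_toList (fun i => (numToSym (locAt profile i)).getD "") _ ""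
  rw [e]
  simp only [String.toList_empty, List.nil_append]
  trans ((List.range (profile.getD 0 []).length).flatMap
    (fun i => [(((numToSym (locAt profile i)).getD "").toList).getD 0 ' ']))
  · apply List.flatMap_congr
    intro i hi
    rw [List.mem_range] at hi
    obtain ⟨ln, hln, hl⟩ := h i hi
    rw [hl, numToSym_loc ln hln]
    rfl
  · exact List.map_eq_flatMap.symm

-- ===== sum plumbing =====
theorem pad_sum (g : Nat → Int) (n K : Nat) (h : n ≤ K) :
    ((List.range n).map g).sum = ((List.range K).map (fun i => if i < n then g i else 0)).sum := by
  induction K, h using Nat.le_induction with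
  | base =>
    congr 1
    apply List.map_congr_left
    intro t ht; rw [List.mem_range] at ht; simp [ht]
  | succ K hK ih =>
    rw [List.range_succ, List.map_append, List.sum_append, ← ih]
    simp; omega

theorem swap_sum (F : String → Nat → Int) (motifs : List String) (K : Nat) :
    (motifs.map (fun x => ((List.range K).map (F x)).sum)).sum
      = ((List.range K).map (fun i => (motifs.map (fun x => F x i)).sum)).sum := by
  induction motifs with
  | nil => simp
  | cons x xs ih =>
    simp only [List.map_cons, List.sum_cons, ih, ← PySem.List.sum_map_add_int]

-- total number of motifs reaching column i
def tot (motifs : List String) (i : Nat) : Int :=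
  (motifs.map (fun x => if i < x.toList.length then (1 : Int) else 0)).sum

theorem ACGT_eq_iff (c d : Char) (hc : ACGT c) (hd : ACGT d) :
    c = d ↔ symToNum c = symToNum d := by
  rcases hc with rfl | rfl | rfl | rfl <;> rcases hd with rfl | rfl | rfl | rfl <;> simp [symToNum]

theorem col_mismatch (motifs : List String) (i : Nat) (c : Char) (ln : Nat)
    (hcc : ACGT c) (hs : symToNum c = some (ln : Int))
    (hok : ∀ x ∈ motifs, ∀ d ∈ x.toList, ACGT d) :
    (motifs.map (fun x => if i < x.toList.length
        then (if c ≠ x.toList.getD i ' ' then (1 : Int) else 0) else 0)).sum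
      = tot motifs i - cnt motifs i ln := by
  induction motifs with
  | nil => simp [tot, cnt]
  | cons x xs ih =>
    have hxs := fun y hy => hok y (List.mem_cons_of_mem _ hy)
    have hx := hok x (List.mem_cons_self)
    simp only [List.map_cons, List.sum_cons, tot, cnt] at *
    rw [ih hxs]
    have : (if i < x.toList.length
        then (if c ≠ x.toList.getD i ' ' then (1 : Int) else 0) else 0)
        = (if i < x.toList.length then (1 : Int) else 0)
          - (if i < x.toList.length ∧ symToNum (x.toList.getD i ' ') = some ((ln : Nat) : Int)
             then (1 : Int) else 0) := by
      by_cases hi : i < x.toList.length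
      · have hd : ACGT (x.toList.getD i ' ') := by
          rw [List.getD_eq_getElem _ ' ' hi]; exact hx _ (List.getElem_mem hi)
        have heq : c = x.toList.getD i ' ' ↔ symToNum (x.toList.getD i ' ') = some ((ln : Nat) : Int) := by
          rw [ACGT_eq_iff c _ hcc hd, hs]; exact ⟨fun h => h.symm, fun h => h.symm⟩
        by_cases hm : c = x.toList.getD i ' '
        · rw [if_pos hi, if_neg (fun hne => hne hm), if_pos hi, if_pos ⟨hi, heq.mp hm⟩]
          norm_num
        · rw [if_pos hi, if_pos hm, if_pos hi,
            if_neg (fun hc => hm (heq.mpr hc.2))]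
          norm_num
      · have hi' : ¬ i < x.length := by simpa using hi
        simp [hi']
    rw [this]; ring

theorem tot_eq_sum_cnt (motifs : List String) (i : Nat)
    (hok : ∀ x ∈ motifs, ∀ d ∈ x.toList, ACGT d) :
    tot motifs i = cnt motifs i 0 + cnt motifs i 1 + cnt motifs i 2 + cnt motifs i 3 := by
  induction motifs with
  | nil => simp [tot, cnt]
  | cons x xs ih =>
    have hxs := fun y hy => hok y (List.mem_cons_of_mem _ hy)
    have hx := hok x (List.mem_cons_self)
    simp only [tot, cnt, List.map_cons, List.sum_cons] at *
    rw [ih hxs]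
    have : (if i < x.toList.length then (1 : Int) else 0)
        = (if i < x.toList.length ∧ symToNum (x.toList.getD i ' ') = some ((0 : Nat) : Int) then (1:Int) else 0)
        + (if i < x.toList.length ∧ symToNum (x.toList.getD i ' ') = some ((1 : Nat) : Int) then (1:Int) else 0)
        + (if i < x.toList.length ∧ symToNum (x.toList.getD i ' ') = some ((2 : Nat) : Int) then (1:Int) else 0)
        + (if i < x.toList.length ∧ symToNum (x.toList.getD i ' ') = some ((3 : Nat) : Int) then (1:Int) else 0) := by
      by_cases hi : i < x.toList.length
      · have hd : ACGT (x.toList.getD i ' ') := by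
          rw [List.getD_eq_getElem _ ' ' hi]; exact hx _ (List.getElem_mem hi)
        rcases hd with h | h | h | h <;> rw [h] <;> simp [symToNum]
      · have hi' : ¬ i < x.length := by simpa using hi
        simp [hi']
    rw [this]; ring

theorem cnt_nonneg (motifs : List String) (i j : Nat) : 0 ≤ cnt motifs i j := by
  apply List.sum_nonneg
  intro y hy
  rw [List.mem_map] at hy
  obtain ⟨x, _, rfl⟩ := hy
  split_ifs <;> omega

theorem list_of_shape (k : Nat) (cs : List (List Int)) (g : Nat → Nat → Int)
    (hsh : Shape k 4 cs) (hget : ∀ i < k, ∀ s < 4, (cs.getD i []).getD s 0 = g i s) :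
    cs = (List.range k).map (fun i => [g i 0, g i 1, g i 2, g i 3]) := by
  apply List.ext_getElem
  · simp [hsh.1]
  · intro i h1 h2
    have hik : i < k := by simpa [hsh.1] using h1
    have hrhs : ((List.range k).map (fun i => [g i 0, g i 1, g i 2, g i 3]))[i]
        = [g i 0, g i 1, g i 2, g i 3] := by
      rw [List.getElem_map, List.getElem_range]
    rw [hrhs]
    have hlen : cs[i].length = 4 := by
      have := hsh.2 i
      rw [if_pos hik] at this
      rw [← List.getD_eq_getElem cs [] h1]; exact this
    apply List.ext_getElem
    · simp [hlen]
    · intro s hs1 hs2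
      have hs4 : s < 4 := by omega
      have := hget i hik s hs4
      rw [List.getD_eq_getElem cs [] h1, List.getD_eq_getElem _ 0 (by omega)] at this
      rw [this]
      interval_cases s <;> rfl

theorem shapeA_init (K : Nat) : Shape 4 K (List.replicate 4 (List.replicate K (1 : Int))) := by
  constructor
  · simp
  · intro j
    by_cases hj : j < 4
    · rw [List.getD_replicate _ (by simpa using hj), if_pos hj]; simp
    · rw [List.getD_eq_default _ _ (by simpa using hj), if_neg hj]; rfl

theorem getA_init (K : Nat) (j i : Nat) (hj : j < 4) (hi : i < K) :
    ((List.replicate 4 (List.replicate K (1 : Int))).getD j []).getD i 0 = 1 := by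
  rw [List.getD_replicate _ (by simpa using hj), List.getD_replicate _ (by simpa using hi)]

theorem shapeB_init (K : Nat) : Shape K 4 ((List.range K).map (fun _ => [(0:Int),0,0,0])) := by
  constructor
  · simp
  · intro i
    by_cases hi : i < K
    · rw [PySem.List.getD_map_range _ _ _ _ hi, if_pos hi]; rfl
    · rw [List.getD_eq_default _ _ (by simpa using hi), if_neg hi]; rfl

theorem getB_init (K : Nat) (i s : Nat) (hi : i < K) (hs : s < 4) :
    (((List.range K).map (fun _ => [(0:Int),0,0,0])).getD i []).getD s 0 = 0 := by
  rw [PySem.List.getD_map_range _ _ _ _ hi]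
  interval_cases s <;> rfl

theorem count_spec : Claim_equal_count := by
  intro motifs _ hpre
  unfold Spec_count
  obtain ⟨hne, hok⟩ := pre_unfold motifs hpre
  obtain ⟨x0, ms, rfl⟩ : ∃ x0 ms, motifs = x0 :: ms := by
    cases motifs with
    | nil => exact absurd rfl hne
    | cons a l => exact ⟨a, l, rfl⟩
  set motifs := x0 :: ms with hmot
  set K := x0.toList.length with hK
  have hk0 : ((PySem.List.pyGet? motifs 0).getD "").toList.length = K := by
    simp [hmot, PySem.List.pyGet?, PySem.List.pyIdx?, hK]
  have hok' : ∀ x ∈ motifs, x.toList.length ≤ K ∧ ∀ c ∈ x.toList, ACGT c := by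
    intro x hx
    obtain ⟨h1, h2⟩ := hok x hx
    exact ⟨by simpa [hmot, hK] using h1, h2⟩
  have hchars : ∀ x ∈ motifs, ∀ d ∈ x.toList, ACGT d := fun x hx => (hok' x hx).2
  -- ===== A side: the (matrixProfileF motifs) matrix =====
  have hmp : matrixProfileF motifs = motifs.foldl (fun m x =>
      (List.range x.toList.length).foldl (fun m i =>
        match symToNum (x.toList.getD i ' ') with
        | some j => m.modify j.toNat (fun row => row.modify i (· + 1))
        | none => m) m) (List.replicate 4 (List.replicate K (1 : Int))) := by
    unfold matrixProfileF
    rw [hk0]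
  obtain ⟨hshA, hgetA⟩ := matA_chr K motifs (List.replicate 4 (List.replicate K (1 : Int)))
    (shapeA_init K) hok'
  have hv : ∀ j < 4, ∀ i < K, ((matrixProfileF motifs).getD j []).getD i 0 = 1 + cnt motifs i j := by
    intro j hj i hi
    rw [hmp, hgetA j i, getA_init K j i hj hi, add_comm]
  have hplen : ((matrixProfileF motifs).getD 0 []).length = K := by
    rw [hmp]
    have := hshA.2 0
    rw [if_pos (by norm_num)] at this
    exact this
  -- locAt facts per column
  have hloc : ∀ i < K, ∃ ln : Nat, ln < 4 ∧ locAt (matrixProfileF motifs) i = (ln : Int) ∧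
      ((matrixProfileF motifs).getD ln []).getD i 0 = 1 + cnt motifs i ln ∧
      (∀ j < 4, cnt motifs i j ≤ cnt motifs i ln) := by
    intro i hi
    have h0 : 0 < ((matrixProfileF motifs).getD 0 []).getD i 0 := by
      rw [hv 0 (by norm_num) i hi]
      have := cnt_nonneg motifs i 0
      omega
    obtain ⟨ln, hln, h2, h1, hub⟩ :=
      best_spec (fun j => ((matrixProfileF motifs).getD j []).getD i 0) h0 4 (by norm_num)
    refine ⟨ln, hln, h2, hv ln hln i hi, fun j hj => ?_⟩
    have := hub j hj
    rw [h1] at this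
    rw [hv j hj i hi, hv ln hln i hi] at this
    omega
  -- the consensus string
  have hagr : (agreee (matrixProfileF motifs)).toList
      = (List.range K).map (fun i => (((numToSym (locAt (matrixProfileF motifs) i)).getD "").toList).getD 0 ' ') := by
    rw [← hplen]
    apply agreee_toList
    intro i hi
    rw [hplen] at hi
    obtain ⟨ln, hln, hl, _⟩ := hloc i hi
    exact ⟨ln, hln, hl⟩
  -- ===== A's score as a column sum =====
  have hcount : count motifs = (motifs.map (fun x =>
      ((List.range x.toList.length).map (fun i =>
        if (agreee (matrixProfileF motifs)).toList.getD i ' ' ≠ x.toList.getD i ' ' then (1 : Int) else 0)).sum)).sum := by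
    unfold count
    rw [PySem.List.foldl_congr_mem motifs _ (fun score x => score +
      ((List.range x.toList.length).map (fun i =>
        if (agreee (matrixProfileF motifs)).toList.getD i ' ' ≠ x.toList.getD i ' ' then (1 : Int) else 0)).sum) 0
      (by
        intro acc x _
        rw [PySem.List.foldl_congr_mem _ _ (fun sc i => sc +
          (if (agreee (matrixProfileF motifs)).toList.getD i ' ' ≠ x.toList.getD i ' ' then (1 : Int) else 0)) acc
          (by intro sc i _; dsimp only; split_ifs <;> omega)]
        rw [PySem.List.foldl_add])]
    rw [PySem.List.foldl_add]
    simp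
  -- pad each motif's sum to K and swap the two sums
  have hpad : count motifs = ((List.range K).map (fun i => (motifs.map (fun x =>
      if i < x.toList.length then
        (if (agreee (matrixProfileF motifs)).toList.getD i ' ' ≠ x.toList.getD i ' ' then (1 : Int) else 0)
      else 0)).sum)).sum := by
    rw [hcount, ← swap_sum]
    apply congrArg
    apply List.map_congr_left
    intro x hx
    exact pad_sum _ _ K (hok' x hx).1
  -- ===== B side =====
  have hcb : count_alt motifs = ((List.range K).map (fun i =>
      (cnt motifs i 0 + cnt motifs i 1 + cnt motifs i 2 + cnt motifs i 3)
        - max (max (max (cnt motifs i 0) (cnt motifs i 1)) (cnt motifs i 2)) (cnt motifs i 3))).sum := by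
    have hca : count_alt motifs = List.foldl
        (fun (acc : Int) (col : List Int) => acc + (col.sum - (PySem.List.max? col (fun y => y)).getD 0)) (0 : Int)
        (motifs.foldl (fun (cs : List (List Int)) x =>
          (List.range x.toList.length).foldl (fun cs i =>
            match idxGet (x.toList.getD i ' ') with
            | some s => cs.modify i (fun col => col.modify s.toNat (· + 1))
            | none => cs) cs) ((List.range K).map (fun _ => [(0:Int),0,0,0]))) := by
      unfold count_alt
      rw [hk0]
    rw [hca]
    obtain ⟨hshB, hgetB⟩ := cntB_chr K motifs ((List.range K).map (fun _ => [(0:Int),0,0,0]))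
      (shapeB_init K) hok'
    rw [list_of_shape K _ (fun i s => cnt motifs i s) hshB
      (by intro i hi s hs; rw [hgetB i s, getB_init K i s hi hs, zero_add])]
    rw [PySem.List.foldl_add]
    rw [List.map_map]
    simp only [zero_add]
    apply congrArg
    apply List.map_congr_left
    intro i _
    simp only [Function.comp]
    rw [PySem.List.max?_id_cons]
    simp [List.foldl]
    ring
  -- ===== per-column equality =====
  rw [hpad, hcb]
  apply congrArg
  apply List.map_congr_left
  intro i hi
  rw [List.mem_range] at hi
  obtain ⟨ln, hln, hl, _, hub⟩ := hloc i hi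
  have hch : (agreee (matrixProfileF motifs)).toList.getD i ' ' = symChar ln := by
    rw [hagr, PySem.List.getD_map_range _ _ _ _ hi, hl, numToSym_loc ln hln]
    rfl
  have hcol : (motifs.map (fun x =>
      if i < x.toList.length then
        (if (agreee (matrixProfileF motifs)).toList.getD i ' ' ≠ x.toList.getD i ' ' then (1 : Int) else 0)
      else 0)).sum = tot motifs i - cnt motifs i ln := by
    rw [show (fun (x : String) =>
        if i < x.toList.length then
          (if (agreee (matrixProfileF motifs)).toList.getD i ' ' ≠ x.toList.getD i ' ' then (1 : Int) else 0)
        else 0) = (fun (x : String) =>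
        if i < x.toList.length then
          (if symChar ln ≠ x.toList.getD i ' ' then (1 : Int) else 0)
        else 0) from by funext x; rw [hch]]
    exact col_mismatch motifs i (symChar ln) ln (symChar_ACGT ln) (symToNum_symChar ln hln) hchars
  rw [hcol, tot_eq_sum_cnt motifs i hchars]
  have h0 := hub 0 (by norm_num)
  have h1 := hub 1 (by norm_num)
  have h2 := hub 2 (by norm_num)
  have h3 := hub 3 (by norm_num)
  have hself : ln = 0 ∨ ln = 1 ∨ ln = 2 ∨ ln = 3 := by omega
  rcases hself with rfl | rfl | rfl | rfl <;> omega
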